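-- pv_equiv track=rewrite | github.com/giovannicampa/rosettas_repo | src/utils/convolutional_utils.py | calculate_params_conv_t
-- ===== SOURCE A (Python) =====
-- from typing import List
--
-- common_strides = [1, 2, 3]
--
-- common_padding = [0, 1, 2]
--
-- def calculate_params_conv_t(input_size: int, output_size: int, kernel_sizes: List):
--     """Given a desired input and output shape for the inverse"""
--
--     for kernel_size in kernel_sizes:
--         for stride in common_strides:
--             if stride > kernel_size:
--                 continue
--             for padding in common_padding:
--                 for padding_out in common_padding:
--                     if padding_out > stride:
--                         continue
--                     calculated_output = (input_size - 1) * stride - 2 * padding + kernel_size + padding_out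
--                     if calculated_output == output_size:
--                         return stride, kernel_size, padding, padding_out
--
--     return None, None, None, None
-- ===== SOURCE B (Python) =====
-- common_strides = [1, 2, 3]
--
-- common_padding = [0, 1, 2]
--
-- # the 9 (stride, padding) candidates, in the same order A visits them
-- _pairs = [(s, p) for s in common_strides for p in common_padding]
--
-- def calculate_params_conv_t(input_size: int, output_size: int, kernel_sizes):
--     """One flat scan over (stride, padding) pairs; padding_out computed in closed form."""
--     for kernel_size in kernel_sizes:
--         for stride, padding in _pairs:
--             if stride > kernel_size:
--                 continue
--             padding_out = output_size - ((input_size - 1) * stride - 2 * padding + kernel_size)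
--             if 0 <= padding_out <= 2 and padding_out <= stride:
--                 return stride, kernel_size, padding, padding_out
--     return None, None, None, None
-- ===== Notes on version B (the rewrite author's own statement) =====
-- stated objective: simpler
-- what changed: The innermost scan over candidate padding_out values is removed: padding_out is computed in closed form as output_size - ((input_size-1)*stride - 2*padding + kernel_size) and accepted iff it lies in {0,1,2} and does not exceed the stride.
import Mathlib
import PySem

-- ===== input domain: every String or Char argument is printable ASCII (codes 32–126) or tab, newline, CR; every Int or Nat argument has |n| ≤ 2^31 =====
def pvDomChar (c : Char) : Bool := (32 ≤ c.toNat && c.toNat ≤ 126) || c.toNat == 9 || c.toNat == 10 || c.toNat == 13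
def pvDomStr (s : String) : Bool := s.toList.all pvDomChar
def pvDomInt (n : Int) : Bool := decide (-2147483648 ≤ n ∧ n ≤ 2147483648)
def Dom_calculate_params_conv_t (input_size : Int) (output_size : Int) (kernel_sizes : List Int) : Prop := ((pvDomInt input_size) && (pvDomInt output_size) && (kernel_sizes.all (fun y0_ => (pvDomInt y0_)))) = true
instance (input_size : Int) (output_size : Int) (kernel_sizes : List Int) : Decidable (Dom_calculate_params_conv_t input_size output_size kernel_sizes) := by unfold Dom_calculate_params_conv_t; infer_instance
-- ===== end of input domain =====

-- B removes the innermost padding_out scan, computing padding_out in closed form (simpler; same result).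


-- ===== PORT A =====
def pvLoopPadOutA (input_size output_size kernel_size stride padding : Int) :
    List Int → Option (Int × Int × Int × Int)
  | [] => none
  | padding_out :: rest =>
    if padding_out > stride then
      pvLoopPadOutA input_size output_size kernel_size stride padding rest
    else if (input_size - 1) * stride - 2 * padding + kernel_size + padding_out = output_size then
      some (stride, kernel_size, padding, padding_out)
    else
      pvLoopPadOutA input_size output_size kernel_size stride padding rest

def pvLoopPadA (input_size output_size kernel_size stride : Int) :
    List Int → Option (Int × Int × Int × Int)
  | [] => none
  | padding :: rest =>
    match pvLoopPadOutA input_size output_size kernel_size stride padding [0, 1, 2] with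
    | some r => some r
    | none => pvLoopPadA input_size output_size kernel_size stride rest

def pvLoopStrideA (input_size output_size kernel_size : Int) :
    List Int → Option (Int × Int × Int × Int)
  | [] => none
  | stride :: rest =>
    if stride > kernel_size then
      pvLoopStrideA input_size output_size kernel_size rest
    else
      match pvLoopPadA input_size output_size kernel_size stride [0, 1, 2] with
      | some r => some r
      | none => pvLoopStrideA input_size output_size kernel_size rest

def pvLoopKernelA (input_size output_size : Int) :
    List Int → Option (Int × Int × Int × Int)
  | [] => none
  | kernel_size :: rest =>
    match pvLoopStrideA input_size output_size kernel_size [1, 2, 3] with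
    | some r => some r
    | none => pvLoopKernelA input_size output_size rest

def calculate_params_conv_t (input_size : Int) (output_size : Int) (kernel_sizes : List Int) : Option Int × Option Int × Option Int × Option Int :=
  match pvLoopKernelA input_size output_size kernel_sizes with
  | some (s, k, p, po) => (some s, some k, some p, some po)
  | none => (none, none, none, none)

-- ===== PORT B =====
def pvPairsB : List (Int × Int) :=
  [(1, 0), (1, 1), (1, 2), (2, 0), (2, 1), (2, 2), (3, 0), (3, 1), (3, 2)]

def pvScanPairsB (input_size output_size kernel_size : Int) :
    List (Int × Int) → Option (Int × Int × Int × Int)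
  | [] => none
  | (stride, padding) :: rest =>
    if stride > kernel_size then
      pvScanPairsB input_size output_size kernel_size rest
    else
      let padding_out := output_size - ((input_size - 1) * stride - 2 * padding + kernel_size)
      if 0 ≤ padding_out ∧ padding_out ≤ 2 ∧ padding_out ≤ stride then
        some (stride, kernel_size, padding, padding_out)
      else
        pvScanPairsB input_size output_size kernel_size rest

def pvLoopKernelB (input_size output_size : Int) :
    List Int → Option (Int × Int × Int × Int)
  | [] => none
  | kernel_size :: rest =>
    match pvScanPairsB input_size output_size kernel_size pvPairsB with
    | some r => some r
    | none => pvLoopKernelB input_size output_size rest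

def calculate_params_conv_t_alt (input_size : Int) (output_size : Int) (kernel_sizes : List Int) : Option Int × Option Int × Option Int × Option Int :=
  match pvLoopKernelB input_size output_size kernel_sizes with
  | some (s, k, p, po) => (some s, some k, some p, some po)
  | none => (none, none, none, none)

-- ===== PRECONDITION & SPEC =====
def Spec_calculate_params_conv_t (input_size : Int) (output_size : Int) (kernel_sizes : List Int) (out : Option Int × Option Int × Option Int × Option Int) : Prop := out = calculate_params_conv_t_alt input_size output_size kernel_sizes
instance (input_size : Int) (output_size : Int) (kernel_sizes : List Int) (out : Option Int × Option Int × Option Int × Option Int) : Decidable (Spec_calculate_params_conv_t input_size output_size kernel_sizes out) := by unfold Spec_calculate_params_conv_t; infer_instance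

-- ===== CLAIM (what is proved, stated in full; the proofs are below) =====
def Claim_equal_calculate_params_conv_t : Prop := ∀ (input_size : Int) (output_size : Int) (kernel_sizes : List Int), Dom_calculate_params_conv_t input_size output_size kernel_sizes → Spec_calculate_params_conv_t input_size output_size kernel_sizes (calculate_params_conv_t input_size output_size kernel_sizes)

-- ===== LEMMAS AND PROOFS =====
-- proof-only helper: the closed-form acceptance test for one (stride, padding) pair
def pvPickC (i o k s p : Int) : Option (Int × Int × Int × Int) :=
  let po := o - ((i - 1) * s - 2 * p + k)
  if 0 ≤ po ∧ po ≤ 2 ∧ po ≤ s then some (s, k, p, po) else none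

lemma padOut_closed (i o k s p : Int) :
    pvLoopPadOutA i o k s p [0, 1, 2] = pvPickC i o k s p := by
  simp only [pvLoopPadOutA, pvPickC]
  split_ifs <;> first | rfl | omega | (simp_all; try omega)

lemma scan_append (i o k : Int) (l1 l2 : List (Int × Int)) :
    pvScanPairsB i o k (l1 ++ l2) =
      (match pvScanPairsB i o k l1 with
       | some r => some r
       | none => pvScanPairsB i o k l2) := by
  induction l1 with
  | nil => rfl
  | cons hd tl ih =>
    obtain ⟨st, pa⟩ := hd
    simp only [List.cons_append, pvScanPairsB, ih]
    split_ifs <;> rfl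

lemma scan_skip (i o k s : Int) (h : s > k) :
    pvScanPairsB i o k [(s, 0), (s, 1), (s, 2)] = none := by
  simp only [pvScanPairsB, if_pos h]

lemma scan_stride (i o k s : Int) (h : ¬ s > k) :
    pvScanPairsB i o k [(s, 0), (s, 1), (s, 2)] = pvLoopPadA i o k s [0, 1, 2] := by
  simp only [pvScanPairsB, pvLoopPadA, if_neg h, padOut_closed, pvPickC]
  split_ifs <;> rfl

lemma perKernel_eq (i o k : Int) :
    pvLoopStrideA i o k [1, 2, 3] = pvScanPairsB i o k pvPairsB := by
  have hp : pvPairsB = [((1:Int), (0:Int)), (1, 1), (1, 2)] ++ ([(2, 0), (2, 1), (2, 2)] ++ [(3, 0), (3, 1), (3, 2)]) := rfl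
  rw [hp, scan_append, scan_append]
  by_cases h1 : (1:Int) > k <;> by_cases h2 : (2:Int) > k <;> by_cases h3 : (3:Int) > k <;>
    simp [pvLoopStrideA, h1, h2, h3, scan_skip, scan_stride] <;>
    first
      | rfl
      | (cases pvLoopPadA i o k 1 [0, 1, 2] <;> cases pvLoopPadA i o k 2 [0, 1, 2] <;>
         cases pvLoopPadA i o k 3 [0, 1, 2] <;> rfl)

lemma kernel_eq (i o : Int) (ks : List Int) :
    pvLoopKernelA i o ks = pvLoopKernelB i o ks := by
  induction ks with
  | nil => rfl
  | cons k rest ih => simp only [pvLoopKernelA, pvLoopKernelB, perKernel_eq, ih]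

-- ===== VERDICT (by name: the statement is the Claim_ definition above) =====
theorem calculate_params_conv_t_spec : Claim_equal_calculate_params_conv_t := by
  intro i o ks _
  unfold Spec_calculate_params_conv_t calculate_params_conv_t calculate_params_conv_t_alt
  rw [kernel_eq]
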